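-- pv_equiv track=rewrite | github.com/danielcs88/Advent-of-Code | 2022/day08.py | height_score
-- ===== SOURCE A (Python) =====
-- from math import prod
--
-- def height_score(entry: list) -> int:
--     scores = []
--     for x in entry:
--         try:
--             score = x.index(False) + 1
--             scores.append(score)
--         except ValueError:
--             score = sum(x)
--             scores.append(score)
--     # return scores
--     return prod(scores)
-- ===== SOURCE B (Python) =====
-- def height_score(entry: list) -> int:
--     # Row score reformulated: count the positions whose prefix is all-True
--     # (branch-free: no first-False search, no break, no sum of elements).
--     result = 1
--     for x in entry:
--         score = 0
--         visible = True
--         for e in x: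
--             score += visible
--             visible = visible and e
--         result *= score
--     return result
-- ===== Notes on version B (the rewrite author's own statement) =====
-- stated objective: alternative
-- what changed: Replaces A's first-False search (.index with exception fallback to sum, scores list, prod) by a branch-free reformulation: a row's score equals the number of positions whose prefix is all True, counted in one pass with a boolean carry (no search, no break, no element sum) and multiplied into a running product.
import Mathlib
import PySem

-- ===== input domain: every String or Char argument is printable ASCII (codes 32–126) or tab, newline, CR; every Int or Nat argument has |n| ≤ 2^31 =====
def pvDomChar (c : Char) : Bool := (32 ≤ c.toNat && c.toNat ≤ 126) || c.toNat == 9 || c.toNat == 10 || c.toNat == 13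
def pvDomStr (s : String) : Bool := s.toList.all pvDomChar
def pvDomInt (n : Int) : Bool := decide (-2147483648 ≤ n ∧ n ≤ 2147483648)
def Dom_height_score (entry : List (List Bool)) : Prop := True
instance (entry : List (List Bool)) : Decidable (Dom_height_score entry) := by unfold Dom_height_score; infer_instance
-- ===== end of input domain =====

-- B reformulates the row score as the count of all-True prefixes, kept with a boolean carry
-- in one branch-free pass (no first-False search, no element sum): an alternative decomposition, same cost.
-- ===== PORT A =====
def pyRowScore (x : List Bool) : Int :=
  match PySem.List.index? x false with
  | some i => (i : Int) + 1
  | none => x.foldl (fun acc e => acc + (if e then 1 else 0)) 0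

def height_score (entry : List (List Bool)) : Int :=
  (entry.foldl (fun scores x => scores ++ [pyRowScore x]) []).foldl (· * ·) 1

-- ===== PORT B =====
def rowScan : List Bool → Int → Bool → Int
  | [], score, _ => score
  | e :: t, score, visible => rowScan t (score + (if visible then 1 else 0)) (visible && e)

def height_score_alt (entry : List (List Bool)) : Int :=
  entry.foldl (fun result x => result * rowScan x 0 true) 1

-- ===== PRECONDITION & SPEC =====
def Spec_height_score (entry : List (List Bool)) (out : Int) : Prop := out = height_score_alt entry
instance (entry : List (List Bool)) (out : Int) : Decidable (Spec_height_score entry out) := by unfold Spec_height_score; infer_instance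

-- ===== CLAIM (what is proved, stated in full; the proofs are below) =====
def Claim_equal_height_score : Prop := ∀ (entry : List (List Bool)), Dom_height_score entry → Spec_height_score entry (height_score entry)

-- ===== LEMMAS AND PROOFS =====

theorem foldl_sum_shift (l : List Bool) : ∀ (a b : Int),
    l.foldl (fun acc e => acc + (if e then 1 else 0)) (a + b)
      = a + l.foldl (fun acc e => acc + (if e then 1 else 0)) b := by
  induction l with
  | nil => simp
  | cons e t ih => intro a b; simp only [List.foldl_cons]; rw [add_assoc]; exact ih a _

theorem pyRowScore_false_cons (t : List Bool) : pyRowScore (false :: t) = 1 := by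
  simp [pyRowScore, PySem.List.index?_eq_idxOf?, List.idxOf?_cons]

theorem pyRowScore_true_cons (t : List Bool) : pyRowScore (true :: t) = 1 + pyRowScore t := by
  unfold pyRowScore
  rw [PySem.List.index?_eq_idxOf?, PySem.List.index?_eq_idxOf?, List.idxOf?_cons]
  cases h : List.idxOf? false t with
  | some j => simp [h]; push_cast; ring
  | none =>
    simp only [h, Option.map_none, List.foldl_cons]
    have h1 := foldl_sum_shift t 1 0
    simp only [add_zero] at h1
    simpa using h1

theorem rowScan_dead (x : List Bool) : ∀ (s : Int), rowScan x s false = s := by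
  induction x with
  | nil => intro s; rfl
  | cons e t ih => intro s; simp [rowScan, ih]

theorem rowScan_live (x : List Bool) : ∀ (s : Int), rowScan x s true = s + pyRowScore x := by
  induction x with
  | nil => intro s; simp [rowScan, pyRowScore, PySem.List.index?_eq_idxOf?]
  | cons e t ih =>
    intro s
    cases e with
    | false => simp [rowScan, rowScan_dead, pyRowScore_false_cons]
    | true => simp [rowScan, ih, pyRowScore_true_cons]; ring

theorem scores_foldl (entry : List (List Bool)) : ∀ (acc : List Int),
    entry.foldl (fun scores x => scores ++ [pyRowScore x]) acc = acc ++ entry.map pyRowScore := by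
  induction entry with
  | nil => simp
  | cons x t ih => intro acc; simp [List.foldl_cons, ih]

theorem prod_foldl (l : List Int) : ∀ (r : Int), l.foldl (· * ·) r = r * l.prod := by
  induction l with
  | nil => simp
  | cons x t ih => intro r; simp only [List.foldl_cons, ih, List.prod_cons]; ring

theorem alt_foldl_shift (t : List (List Bool)) : ∀ (r : Int),
    t.foldl (fun result x => result * rowScan x 0 true) r
      = r * t.foldl (fun result x => result * rowScan x 0 true) 1 := by
  induction t with
  | nil => simp
  | cons y u ih =>
    intro r
    simp only [List.foldl_cons]
    rw [ih (r * rowScan y 0 true), ih (1 * rowScan y 0 true)]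
    ring

theorem prod_eq_alt (entry : List (List Bool)) :
    (entry.map pyRowScore).prod = entry.foldl (fun result x => result * rowScan x 0 true) 1 := by
  induction entry with
  | nil => simp
  | cons x t ih =>
    simp only [List.map_cons, List.prod_cons, List.foldl_cons, one_mul]
    rw [alt_foldl_shift, ← ih]
    have := rowScan_live x 0
    simp only [zero_add] at this
    rw [this]

-- ===== VERDICT (by name: the statement is the Claim_ definition above) =====
theorem height_score_spec : Claim_equal_height_score := by
  intro entry _
  unfold Spec_height_score height_score height_score_alt
  rw [scores_foldl, List.nil_append, prod_foldl, one_mul, prod_eq_alt]
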